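-- pv_equiv track=rewrite | github.com/Bhumika2006-hue/GFG-Code-by-Bhumi | Difficulty: Medium/Police and Thieves/police-and-thieves.py | catchThieves
-- ===== SOURCE A (Python) =====
-- def catchThieves(arr, k):
--     police = []
--     thieves = []
--
--     # Store positions
--     for i in range(len(arr)):
--         if arr[i] == 'P':
--             police.append(i)
--         else:
--             thieves.append(i)
--
--     i = j = 0
--     caught = 0
--
--     # Two pointer matching
--     while i < len(police) and j < len(thieves):
--         if abs(police[i] - thieves[j]) <= k:
--             caught += 1
--             i += 1
--             j += 1
--         elif thieves[j] < police[i]: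
--             j += 1
--         else:
--             i += 1
--
--     return caught
-- ===== SOURCE B (Python) =====
-- def catchThieves(arr, k):
--     # One left-to-right pass: keep queues of still-unmatched police/thief
--     # positions, drop fronts that are more than k away, match greedily.
--     pending_police = []
--     pending_thieves = []
--     caught = 0
--     for i, s in enumerate(arr):
--         if s == 'P':
--             while pending_thieves and i - pending_thieves[0] > k:
--                 pending_thieves.pop(0)
--             if pending_thieves:
--                 pending_thieves.pop(0)
--                 caught += 1
--             else:
--                 pending_police.append(i)
--         else:
--             while pending_police and i - pending_police[0] > k:
--                 pending_police.pop(0)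
--             if pending_police:
--                 pending_police.pop(0)
--                 caught += 1
--             else:
--                 pending_thieves.append(i)
--     return caught
-- ===== Notes on version B (the rewrite author's own statement) =====
-- stated objective: alternative
-- what changed: Replaces A's collect-positions-then-two-pointer matching with a single left-to-right pass that keeps queues of pending unmatched police/thief positions, pruning stale fronts farther than k and matching greedily on the spot.
import Mathlib
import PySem

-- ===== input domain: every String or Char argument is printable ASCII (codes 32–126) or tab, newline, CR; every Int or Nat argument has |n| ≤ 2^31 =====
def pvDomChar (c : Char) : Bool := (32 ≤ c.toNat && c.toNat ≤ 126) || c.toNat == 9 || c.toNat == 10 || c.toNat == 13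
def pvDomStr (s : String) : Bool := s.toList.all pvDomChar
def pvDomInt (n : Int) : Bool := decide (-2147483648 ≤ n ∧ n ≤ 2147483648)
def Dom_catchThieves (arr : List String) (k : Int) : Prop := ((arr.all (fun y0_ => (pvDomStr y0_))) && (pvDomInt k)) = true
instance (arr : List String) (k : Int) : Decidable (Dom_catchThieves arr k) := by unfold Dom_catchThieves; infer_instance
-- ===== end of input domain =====

-- B replaces A's collect-then-two-pointer matching by a single pass with pending
-- police/thief queues (alternative decomposition, same return value everywhere).

-- ===== PORT A =====
-- the 'while i < len(police) and j < len(thieves)' loop; i, j are the two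
-- cursors (kept as Nat: in A they start at 0 and are only ever incremented)
def catchLoopA (k : Int) (police thieves : List Int) (i j : Nat) (caught : Int) : Int :=
  if h : i < police.length ∧ j < thieves.length then
    if |police[i]'h.1 - thieves[j]'h.2| ≤ k then
      catchLoopA k police thieves (i + 1) (j + 1) (caught + 1)
    else if thieves[j]'h.2 < police[i]'h.1 then
      catchLoopA k police thieves i (j + 1) caught
    else
      catchLoopA k police thieves (i + 1) j caught
  else caught
termination_by (police.length - i) + (thieves.length - j)
decreasing_by all_goals omega

def catchThieves (arr : List String) (k : Int) : Int :=
  -- for i in range(len(arr)): append i to police / thieves according to arr[i]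
  let st := (PySem.List.pyRange 0 (arr.length : Int) 1).foldl
    (fun (st : List Int × List Int) i =>
      if PySem.List.pyGetD arr i "" == "P" then (st.1 ++ [i], st.2) else (st.1, st.2 ++ [i]))
    ([], [])
  catchLoopA k st.1 st.2 0 0 0

-- ===== PORT B =====
-- the 'while pending and i - pending[0] > k: pending.pop(0)' loop
def pruneB (k i : Int) : List Int → List Int
  | [] => []
  | t :: ts => if i - t > k then pruneB k i ts else t :: ts

-- the 'for i, s in enumerate(arr)' loop of Source B
def scanB (k : Int) : List (Int × String) → List Int → List Int → Int → Int
  | [], _, _, caught => caught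
  | (i, s) :: rest, pp, pt, caught =>
    if s == "P" then
      match pruneB k i pt with
      | _ :: ts => scanB k rest pp ts (caught + 1)
      | [] => scanB k rest (pp ++ [i]) [] caught
    else
      match pruneB k i pp with
      | _ :: ps => scanB k rest ps pt (caught + 1)
      | [] => scanB k rest [] (pt ++ [i]) caught

def catchThieves_alt (arr : List String) (k : Int) : Int :=
  scanB k (PySem.List.enumerate arr 0) [] [] 0

-- ===== PRECONDITION & SPEC =====
def Spec_catchThieves (arr : List String) (k : Int) (out : Int) : Prop := out = catchThieves_alt arr k
instance (arr : List String) (k : Int) (out : Int) : Decidable (Spec_catchThieves arr k out) := by unfold Spec_catchThieves; infer_instance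

-- ===== CLAIM (what is proved, stated in full; the proofs are below) =====
def Claim_equal_catchThieves : Prop := ∀ (arr : List String) (k : Int), Dom_catchThieves arr k → Spec_catchThieves arr k (catchThieves arr k)

-- ===== LEMMAS AND PROOFS =====

-- positions of police / thieves in l, indices starting at m
def posP : List String → Int → List Int
  | [], _ => []
  | s :: r, m => if s == "P" then m :: posP r (m + 1) else posP r (m + 1)

def posT : List String → Int → List Int
  | [], _ => []
  | s :: r, m => if s == "P" then posT r (m + 1) else m :: posT r (m + 1)

-- pivot: the greedy two-pointer matching as structural recursion on the two lists
def twopt (k : Int) : List Int → List Int → Int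
  | p :: ps, t :: ts =>
    if |p - t| ≤ k then 1 + twopt k ps ts
    else if t < p then twopt k (p :: ps) ts
    else twopt k ps (t :: ts)
  | _, _ => 0
termination_by l1 l2 => l1.length + l2.length
decreasing_by all_goals simp <;> omega

theorem twopt_nil_left (k : Int) (ts : List Int) : twopt k [] ts = 0 := by
  cases ts <;> simp [twopt]

theorem twopt_nil_right (k : Int) (ps : List Int) : twopt k ps [] = 0 := by
  cases ps <;> simp [twopt]

-- A-side: the collecting fold computes (posP, posT)
theorem buildA_aux (arr : List String) : ∀ (l : List String) (m : Nat), arr.drop m = l →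
    ∀ (pol thv : List Int),
    (PySem.List.pyRange (m : Int) (arr.length : Int) 1).foldl
      (fun (st : List Int × List Int) i =>
        if PySem.List.pyGetD arr i "" == "P" then (st.1 ++ [i], st.2) else (st.1, st.2 ++ [i]))
      (pol, thv)
    = (pol ++ posP l (m : Int), thv ++ posT l (m : Int)) := by
  intro l
  induction l with
  | nil =>
    intro m hm pol thv
    have hlen : arr.length ≤ m := by
      have := congrArg List.length hm; simp at this; omega
    rw [PySem.List.pyRange_one_eq_nil (by exact_mod_cast hlen)]
    simp [posP, posT]
  | cons s l' ih =>
    intro m hm pol thv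
    have hm' : m < arr.length := by
      have := congrArg List.length hm; simp at this; omega
    have hdrop : arr.drop m = arr[m] :: arr.drop (m + 1) := List.drop_eq_getElem_cons hm'
    have hs : arr[m] = s := by rw [hm] at hdrop; exact ((List.cons.injEq _ _ _ _ ▸ hdrop).1).symm
    have hl' : arr.drop (m + 1) = l' := by rw [hm] at hdrop; exact ((List.cons.injEq _ _ _ _ ▸ hdrop).2).symm
    rw [PySem.List.pyRange_one_cons (by exact_mod_cast hm')]
    have hget : PySem.List.pyGetD arr (m : Int) "" = s := by
      rw [PySem.List.pyGetD_natCast, List.getD_eq_getElem _ _ hm']; exact hs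
    simp only [List.foldl_cons, hget]
    by_cases hP : s == "P"
    · rw [if_pos hP]
      rw [show (m : Int) + 1 = ((m + 1 : Nat) : Int) by push_cast; ring] at *
      rw [ih (m + 1) hl' (pol ++ [(m : Int)]) thv]
      simp [posP, posT, hP]
    · rw [if_neg hP]
      rw [show (m : Int) + 1 = ((m + 1 : Nat) : Int) by push_cast; ring] at *
      rw [ih (m + 1) hl' pol (thv ++ [(m : Int)])]
      simp [posP, posT, hP]

-- A-side: the while loop computes twopt of the remaining suffixes
theorem catchLoopA_eq (k : Int) (police thieves : List Int) :
    ∀ (i j : Nat) (c : Int),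
    catchLoopA k police thieves i j c = c + twopt k (police.drop i) (thieves.drop j) := by
  intro i j c
  fun_induction catchLoopA k police thieves i j c with
  | case1 i j c h hle ih =>
    rw [List.drop_eq_getElem_cons h.1, List.drop_eq_getElem_cons h.2, twopt, if_pos hle, ih]
    ring
  | case2 i j c h hle hlt ih =>
    rw [List.drop_eq_getElem_cons h.1, List.drop_eq_getElem_cons h.2, twopt, if_neg hle,
      if_pos hlt, ih, ← List.drop_eq_getElem_cons h.1]
  | case3 i j c h hle hlt ih =>
    rw [List.drop_eq_getElem_cons h.1, List.drop_eq_getElem_cons h.2, twopt, if_neg hle,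
      if_neg hlt, ih, ← List.drop_eq_getElem_cons h.2]
  | case4 i j c h =>
    rcases Nat.lt_or_ge i police.length with hi | hi
    · have hj : thieves.length ≤ j := by omega
      rw [List.drop_of_length_le hj, twopt_nil_right]; ring
    · rw [List.drop_of_length_le hi, twopt_nil_left]; ring

-- pruning a pending list keeps it a suffix
theorem pruneB_mem (k i : Int) (pt : List Int) : ∀ x ∈ pruneB k i pt, x ∈ pt := by
  induction pt with
  | nil => simp [pruneB]
  | cons t ts ih =>
    intro x hx
    by_cases h : i - t > k
    · simp [pruneB, h] at hx; exact List.mem_cons_of_mem _ (ih x hx)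
    · simpa [pruneB, h] using hx

theorem pruneB_head (k i : Int) (pt : List Int) (t : Int) (ts : List Int)
    (h : pruneB k i pt = t :: ts) : i - t ≤ k := by
  induction pt with
  | nil => simp [pruneB] at h
  | cons t0 ts0 ih =>
    by_cases h0 : i - t0 > k
    · simp only [pruneB, if_pos h0] at h; exact ih h
    · simp only [pruneB, if_neg h0] at h
      obtain ⟨rfl, rfl⟩ := List.cons.injEq _ _ _ _ ▸ h
      omega

-- dropping stale thief fronts does not change the two-pointer result
theorem twopt_pruneT (k i : Int) (Ps Ts : List Int) :
    ∀ pt : List Int, (∀ x ∈ pt, x < i) →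
    twopt k (i :: Ps) (pt ++ Ts) = twopt k (i :: Ps) (pruneB k i pt ++ Ts) := by
  intro pt
  induction pt with
  | nil => simp [pruneB]
  | cons t ts ih =>
    intro hlt
    by_cases h : i - t > k
    · have ht : t < i := hlt t (by simp)
      rw [List.cons_append, twopt, if_neg (by rw [abs_of_pos (by omega)]; omega), if_pos ht,
        ih (fun x hx => hlt x (List.mem_cons_of_mem _ hx))]
      simp [pruneB, h]
    · simp [pruneB, h]

-- dropping stale police fronts does not change the two-pointer result
theorem twopt_pruneP (k i : Int) (Ps Ts : List Int) :
    ∀ pp : List Int, (∀ x ∈ pp, x < i) →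
    twopt k (pp ++ Ps) (i :: Ts) = twopt k (pruneB k i pp ++ Ps) (i :: Ts) := by
  intro pp
  induction pp with
  | nil => simp [pruneB]
  | cons p ps ih =>
    intro hlt
    by_cases h : i - p > k
    · have hp : p < i := hlt p (by simp)
      rw [List.cons_append, twopt, if_neg (by rw [abs_of_neg (by omega)]; omega),
        if_neg (by omega), ih (fun x hx => hlt x (List.mem_cons_of_mem _ hx))]
      simp [pruneB, h]
    · simp [pruneB, h]

-- B-side main invariant
theorem scanB_eq (k : Int) : ∀ (l : List String) (m : Int) (pp pt : List Int) (c : Int),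
    (pp = [] ∨ pt = []) → (∀ x ∈ pp, x < m) → (∀ x ∈ pt, x < m) →
    scanB k (PySem.List.enumerate l m) pp pt c
      = c + twopt k (pp ++ posP l m) (pt ++ posT l m) := by
  intro l
  induction l with
  | nil =>
    intro m pp pt c hd _ _
    rcases hd with rfl | rfl
    · simp [PySem.List.enumerate_nil, scanB, posP, posT, twopt_nil_left]
    · simp [PySem.List.enumerate_nil, scanB, posP, posT, twopt_nil_right]
  | cons s l' ih =>
    intro m pp pt c hd hpp hpt
    rw [PySem.List.enumerate_cons]
    by_cases hP : s == "P"
    · simp only [scanB, posP, posT, hP, if_pos]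
      by_cases hptnil : pt = []
      · subst hptnil
        simp only [pruneB]
        rw [show pp ++ [m] = pp ++ [m] from rfl, ih (m + 1) (pp ++ [m]) [] c (Or.inr rfl)
          (by intro x hx; rcases List.mem_append.1 hx with h | h
              · exact lt_trans (hpp x h) (by omega)
              · simp at h; omega)
          (by simp)]
        simp
      · have hppnil : pp = [] := by rcases hd with h | h; exact h; exact absurd h hptnil
        subst hppnil
        rw [List.nil_append, List.nil_append,
          twopt_pruneT k m (posP l' (m + 1)) (posT l' (m + 1)) pt hpt]
        cases hpr : pruneB k m pt with
        | nil =>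
          rw [show ([m] : List Int) = [] ++ [m] from rfl, ih (m + 1) ([] ++ [m]) [] c (Or.inr rfl) (by simp) (by simp)]
          simp
        | cons t ts =>
          have ht : t < m := hpt t (pruneB_mem k m pt t (hpr ▸ by simp))
          have hts : ∀ x ∈ ts, x < m + 1 := fun x hx =>
            lt_trans (hpt x (pruneB_mem k m pt x (hpr ▸ List.mem_cons_of_mem _ hx))) (by omega)
          have hk : m - t ≤ k := pruneB_head k m pt t ts hpr
          simp only []
          rw [ih (m + 1) [] ts (c + 1) (Or.inl rfl) (by simp) hts,
            List.cons_append, twopt, if_pos (by rw [abs_of_pos (by omega)]; omega)]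
          simp; ring
    · simp only [scanB, posP, posT, hP, Bool.false_eq_true, not_false_eq_true, if_neg]
      by_cases hppnil : pp = []
      · subst hppnil
        simp only [pruneB]
        rw [ih (m + 1) [] (pt ++ [m]) c (Or.inl rfl) (by simp)
          (by intro x hx; rcases List.mem_append.1 hx with h | h
              · exact lt_trans (hpt x h) (by omega)
              · simp at h; omega)]
        simp
      · have hptnil : pt = [] := by rcases hd with h | h; exact absurd h hppnil; exact h
        subst hptnil
        rw [List.nil_append, List.nil_append,
          twopt_pruneP k m (posP l' (m + 1)) (posT l' (m + 1)) pp hpp]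
        cases hpr : pruneB k m pp with
        | nil =>
          rw [show ([m] : List Int) = [] ++ [m] from rfl, ih (m + 1) [] ([] ++ [m]) c (Or.inl rfl) (by simp) (by simp)]
          simp
        | cons p ps =>
          have hp : p < m := hpp p (pruneB_mem k m pp p (hpr ▸ by simp))
          have hps : ∀ x ∈ ps, x < m + 1 := fun x hx =>
            lt_trans (hpp x (pruneB_mem k m pp x (hpr ▸ List.mem_cons_of_mem _ hx))) (by omega)
          have hk : m - p ≤ k := pruneB_head k m pp p ps hpr
          simp only []
          rw [ih (m + 1) ps [] (c + 1) (Or.inr rfl) hps (by simp),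
            List.cons_append, twopt, if_pos (by rw [abs_of_neg (by omega)]; omega)]
          simp; ring

-- ===== VERDICT (by name: the statement is the Claim_ definition above) =====
theorem catchThieves_spec : Claim_equal_catchThieves := by
  intro arr k _
  unfold Spec_catchThieves catchThieves catchThieves_alt
  have hbuild := buildA_aux arr arr 0 (by simp) [] []
  simp only [Nat.cast_zero] at hbuild
  rw [hbuild]
  rw [catchLoopA_eq, scanB_eq k arr 0 [] [] 0 (Or.inl rfl) (by simp) (by simp)]
  simp
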